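-- pv_equiv track=rewrite | github.com/Casvt/Kapowarr | backend/implementations/direct_clients/mega.py | get_chunks
-- ===== SOURCE A (Python) =====
-- from typing import Any, Callable, Dict, Generator, List, Sequence, Tuple, Union
--
-- def get_chunks(size: int) -> Generator[Tuple[int, int], Any, None]:
--     """
--     Calculate chunks for a given encrypted file size.
--     """
--     chunk_start = 0
--     chunk_size = 0x20000
--
--     while chunk_start + chunk_size < size:
--         yield chunk_start, chunk_size
--         chunk_start += chunk_size
--         if chunk_size < 0x100000:
--             chunk_size += 0x20000
--
--     if chunk_start < size:
--         yield chunk_start, size - chunk_start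
-- ===== SOURCE B (Python) =====
-- # Closed-form chunk boundaries: the ramp-up starts are the 9 prefix sums
-- # 0x20000*k*(k+1)//2 (k = 0..8); after that starts advance by a fixed 0x100000.
-- _RAMP = [0x20000 * k * (k + 1) // 2 for k in range(9)]
--
-- def get_chunks(size: int):
--     """
--     Calculate chunks for a given encrypted file size.
--     Builds the list of chunk start offsets in closed form, then pairs
--     consecutive starts (ending at size) to get the chunk sizes.
--     """
--     starts = [b for b in _RAMP if b < size]
--     if size > _RAMP[-1]:
--         starts.extend(range(_RAMP[-1] + 0x100000, size, 0x100000))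
--     for s, e in zip(starts, starts[1:] + [size]):
--         yield s, e - s
-- ===== Notes on version B (the rewrite author's own statement) =====
-- stated objective: alternative
-- what changed: Replaced A's stateful while loop (mutating chunk_start/chunk_size with a trailing conditional yield) by a closed-form construction: the chunk start offsets are precomputed as the nine triangular-number ramp prefix sums plus an arithmetic range() of fixed stride, filtered to below size, and chunks are obtained by zipping consecutive starts.
import Mathlib
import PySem

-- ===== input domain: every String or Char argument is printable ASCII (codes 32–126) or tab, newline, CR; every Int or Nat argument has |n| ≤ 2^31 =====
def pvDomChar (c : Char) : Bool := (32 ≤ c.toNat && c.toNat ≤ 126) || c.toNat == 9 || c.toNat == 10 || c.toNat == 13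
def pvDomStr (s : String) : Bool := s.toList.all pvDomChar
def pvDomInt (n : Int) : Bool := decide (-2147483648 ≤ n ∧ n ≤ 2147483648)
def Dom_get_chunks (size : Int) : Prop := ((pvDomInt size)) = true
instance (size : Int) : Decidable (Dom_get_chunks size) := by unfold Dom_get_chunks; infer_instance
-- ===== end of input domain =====

-- B replaces A's stateful while loop by a closed-form list of chunk start offsets
-- (the 9 ramp prefix sums, then an arithmetic range) paired up by zipping (objective: alternative).

-- ===== PORT A =====
-- while chunk_start + chunk_size < size: yield; advance; ramp up chunk_size; then a trailing conditional yield
def get_chunksA_loop (size chunk_start chunk_size : Int) (h : 0 < chunk_size) : List (Int × Int) :=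
  if chunk_start + chunk_size < size then
    (chunk_start, chunk_size) ::
      get_chunksA_loop size (chunk_start + chunk_size)
        (if chunk_size < 0x100000 then chunk_size + 0x20000 else chunk_size)
        (by split <;> omega)
  else if chunk_start < size then [(chunk_start, size - chunk_start)] else []
termination_by (size - chunk_start).toNat
decreasing_by omega

def get_chunks (size : Int) : List (Int × Int) :=
  get_chunksA_loop size 0 0x20000 (by norm_num)

-- ===== PORT B =====
-- _RAMP = [0x20000 * k * (k + 1) // 2 for k in range(9)]
def pvRampB : List Int :=
  (PySem.List.pyRange 0 9 1).map (fun k => PySem.Int.floordiv (0x20000 * k * (k + 1)) 2)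

-- starts = [b for b in _RAMP if b < size]; extend with range(_RAMP[-1]+0x100000, size, 0x100000)
-- when size > _RAMP[-1]; then yield (s, e - s) for s, e in zip(starts, starts[1:] + [size])
def get_chunks_alt (size : Int) : List (Int × Int) :=
  let starts0 := pvRampB.filter (fun b => decide (b < size))
  let starts :=
    if PySem.List.pyGetD pvRampB (-1) 0 < size then
      starts0 ++ PySem.List.pyRange (PySem.List.pyGetD pvRampB (-1) 0 + 0x100000) size 0x100000
    else starts0
  (starts.zip (PySem.List.slice starts (some 1) none ++ [size])).map (fun p => (p.1, p.2 - p.1))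

-- ===== PRECONDITION & SPEC =====
def Spec_get_chunks (size : Int) (out : List (Int × Int)) : Prop := out = get_chunks_alt size
instance (size : Int) (out : List (Int × Int)) : Decidable (Spec_get_chunks size out) := by
  unfold Spec_get_chunks; infer_instance

-- ===== CLAIM =====
def Claim_equal_get_chunks : Prop := ∀ (size : Int), Dom_get_chunks size → Spec_get_chunks size (get_chunks size)

-- ===== LEMMAS AND PROOFS =====

-- pair consecutive starts, closing the last chunk at `size`
def pvPairs (size : Int) : List Int → List (Int × Int)
  | [] => []
  | [x] => [(x, size - x)]
  | x :: y :: l => (x, y - x) :: pvPairs size (y :: l)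

theorem pvRampB_eq :
    pvRampB = [0, 131072, 393216, 786432, 1310720, 1966080, 2752512, 3670016, 4718592] := by
  decide

theorem pvRampB_last : PySem.List.pyGetD pvRampB (-1) 0 = 4718592 := by decide

theorem zip_pairs (size : Int) (l : List Int) :
    (l.zip (PySem.List.slice l (some 1) none ++ [size])).map (fun p => (p.1, p.2 - p.1)) =
      pvPairs size l := by
  rw [PySem.List.slice_from_one]
  induction l with
  | nil => rfl
  | cons x l ih =>
    cases l with
    | nil => rfl
    | cons y m =>
      simp only [List.tail_cons, List.cons_append, List.zip_cons_cons, List.map_cons, pvPairs]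
      exact congrArg _ (by simpa using ih)

theorem pyRange_big_nil (a b : Int) (h : b ≤ a) : PySem.List.pyRange a b 1048576 = [] := by
  rw [PySem.List.pyRange_of_pos a b (by norm_num)]
  simp [show ¬ a < b by omega]

theorem pyRange_big_cons (a b : Int) (h : a < b) :
    PySem.List.pyRange a b 1048576 = a :: PySem.List.pyRange (a + 1048576) b 1048576 := by
  rw [PySem.List.pyRange_of_pos a b (by norm_num),
      PySem.List.pyRange_of_pos (a + 1048576) b (by norm_num)]
  by_cases h2 : a + 1048576 < b
  · have hn : ((b - a + 1048576 - 1) / 1048576).toNat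
        = ((b - (a + 1048576) + 1048576 - 1) / 1048576).toNat + 1 := by omega
    rw [if_pos h, if_pos h2, hn, List.range_succ_eq_map]
    simp only [List.map_cons, List.map_map]
    refine congrArg₂ _ (by ring) (List.map_congr_left fun k _ => ?_)
    simp only [Function.comp]
    push_cast
    ring
  · have hn : ((b - a + 1048576 - 1) / 1048576).toNat = 1 := by omega
    rw [if_pos h, if_neg h2, hn]
    simp

theorem stepA (size s c s' c' : Int) (h : 0 < c) (h' : 0 < c')
    (hlt : s + c < size) (hs : s' = s + c)
    (hcs : c' = if c < 0x100000 then c + 0x20000 else c) :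
    get_chunksA_loop size s c h = (s, c) :: get_chunksA_loop size s' c' h' := by
  rw [get_chunksA_loop, if_pos hlt]
  subst hs; subst hcs
  rfl

theorem tail_eq (size : Int) : ∀ (n : Nat) (s : Int), (size - s).toNat ≤ n →
    ∀ (h : (0:Int) < 1048576),
    get_chunksA_loop size s 1048576 h = pvPairs size (PySem.List.pyRange s size 1048576) := by
  intro n
  induction n with
  | zero =>
    intro s hb h
    rw [get_chunksA_loop, pyRange_big_nil s size (by omega)]
    simp only [show ¬ s + 1048576 < size by omega, if_false, show ¬ s < size by omega]
    rfl
  | succ n ih =>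
    intro s hb h
    by_cases h1 : s + 1048576 < size
    · rw [stepA size s 1048576 (s + 1048576) 1048576 h (by norm_num) h1 rfl (by norm_num),
          ih (s + 1048576) (by omega) (by norm_num),
          pyRange_big_cons s size (by omega),
          pyRange_big_cons (s + 1048576) size (by omega)]
      rw [← pyRange_big_cons (s + 1048576) size (by omega)]
      simp [pvPairs, pyRange_big_cons (s + 1048576) size (by omega)]
    · rw [get_chunksA_loop, if_neg h1]
      by_cases h2 : s < size
      · rw [if_pos h2, pyRange_big_cons s size h2, pyRange_big_nil (s + 1048576) size (by omega)]
        rfl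
      · rw [if_neg h2, pyRange_big_nil s size (by omega)]
        rfl

-- ===== VERDICT =====
theorem get_chunks_spec : Claim_equal_get_chunks := by
  intro size _
  unfold Spec_get_chunks get_chunks get_chunks_alt
  rw [pvRampB_last, zip_pairs, pvRampB_eq]
  have hstarts :
      (if (4718592:Int) < size then
          ([0, 131072, 393216, 786432, 1310720, 1966080, 2752512, 3670016, 4718592].filter
            (fun b => decide (b < size))) ++ PySem.List.pyRange (4718592 + 0x100000) size 0x100000
        else ([0, 131072, 393216, 786432, 1310720, 1966080, 2752512, 3670016, 4718592].filter
            (fun b => decide (b < size))))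
      = ([0, 131072, 393216, 786432, 1310720, 1966080, 2752512, 3670016, 4718592].filter
            (fun b => decide (b < size))) ++ PySem.List.pyRange 5767168 size 1048576 := by
    split
    · norm_num
    · rw [pyRange_big_nil 5767168 size (by omega)]
      simp
  rw [hstarts]
  simp only [List.filter_cons, List.filter_nil, decide_eq_true_eq]
  by_cases h8 : (4718592:Int) < size
  · rw [if_pos (show (0:Int) < size by omega), if_pos (show (131072:Int) < size by omega),
        if_pos (show (393216:Int) < size by omega), if_pos (show (786432:Int) < size by omega),
        if_pos (show (1310720:Int) < size by omega), if_pos (show (1966080:Int) < size by omega),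
        if_pos (show (2752512:Int) < size by omega), if_pos (show (3670016:Int) < size by omega),
        if_pos (show (4718592:Int) < size by omega)]
    rw [stepA size 0 131072 131072 262144 (by norm_num) (by norm_num) (by omega) (by norm_num) (by norm_num),
        stepA size 131072 262144 393216 393216 (by norm_num) (by norm_num) (by omega) (by norm_num) (by norm_num),
        stepA size 393216 393216 786432 524288 (by norm_num) (by norm_num) (by omega) (by norm_num) (by norm_num),
        stepA size 786432 524288 1310720 655360 (by norm_num) (by norm_num) (by omega) (by norm_num) (by norm_num),
        stepA size 1310720 655360 1966080 786432 (by norm_num) (by norm_num) (by omega) (by norm_num) (by norm_num),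
        stepA size 1966080 786432 2752512 917504 (by norm_num) (by norm_num) (by omega) (by norm_num) (by norm_num),
        stepA size 2752512 917504 3670016 1048576 (by norm_num) (by norm_num) (by omega) (by norm_num) (by norm_num),
        stepA size 3670016 1048576 4718592 1048576 (by norm_num) (by norm_num) (by omega) (by norm_num) (by norm_num),
        tail_eq size (size - 4718592).toNat 4718592 (by omega) (by norm_num),
        pyRange_big_cons 4718592 size (by omega)]
    norm_num [pvPairs]
  · rw [pyRange_big_nil 5767168 size (by omega), List.append_nil]
    by_cases h7 : (3670016:Int) < size
    · rw [if_pos (show (0:Int) < size by omega), if_pos (show (131072:Int) < size by omega),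
          if_pos (show (393216:Int) < size by omega), if_pos (show (786432:Int) < size by omega),
          if_pos (show (1310720:Int) < size by omega), if_pos (show (1966080:Int) < size by omega),
          if_pos (show (2752512:Int) < size by omega), if_pos (show (3670016:Int) < size by omega),
          if_neg (show ¬ (4718592:Int) < size by omega)]
      rw [stepA size 0 131072 131072 262144 (by norm_num) (by norm_num) (by omega) (by norm_num) (by norm_num),
          stepA size 131072 262144 393216 393216 (by norm_num) (by norm_num) (by omega) (by norm_num) (by norm_num),
          stepA size 393216 393216 786432 524288 (by norm_num) (by norm_num) (by omega) (by norm_num) (by norm_num),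
          stepA size 786432 524288 1310720 655360 (by norm_num) (by norm_num) (by omega) (by norm_num) (by norm_num),
          stepA size 1310720 655360 1966080 786432 (by norm_num) (by norm_num) (by omega) (by norm_num) (by norm_num),
          stepA size 1966080 786432 2752512 917504 (by norm_num) (by norm_num) (by omega) (by norm_num) (by norm_num),
          stepA size 2752512 917504 3670016 1048576 (by norm_num) (by norm_num) (by omega) (by norm_num) (by norm_num)]
      rw [get_chunksA_loop, if_neg (show ¬ (3670016:Int) + 1048576 < size by omega),
          if_pos (show (3670016:Int) < size by omega)]
      norm_num [pvPairs]
    · by_cases h6 : (2752512:Int) < size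
      · rw [if_pos (show (0:Int) < size by omega), if_pos (show (131072:Int) < size by omega),
            if_pos (show (393216:Int) < size by omega), if_pos (show (786432:Int) < size by omega),
            if_pos (show (1310720:Int) < size by omega), if_pos (show (1966080:Int) < size by omega),
            if_pos (show (2752512:Int) < size by omega), if_neg (show ¬ (3670016:Int) < size by omega),
            if_neg (show ¬ (4718592:Int) < size by omega)]
        rw [stepA size 0 131072 131072 262144 (by norm_num) (by norm_num) (by omega) (by norm_num) (by norm_num),
            stepA size 131072 262144 393216 393216 (by norm_num) (by norm_num) (by omega) (by norm_num) (by norm_num),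
            stepA size 393216 393216 786432 524288 (by norm_num) (by norm_num) (by omega) (by norm_num) (by norm_num),
            stepA size 786432 524288 1310720 655360 (by norm_num) (by norm_num) (by omega) (by norm_num) (by norm_num),
            stepA size 1310720 655360 1966080 786432 (by norm_num) (by norm_num) (by omega) (by norm_num) (by norm_num),
            stepA size 1966080 786432 2752512 917504 (by norm_num) (by norm_num) (by omega) (by norm_num) (by norm_num)]
        rw [get_chunksA_loop, if_neg (show ¬ (2752512:Int) + 917504 < size by omega),
            if_pos (show (2752512:Int) < size by omega)]
        norm_num [pvPairs]
      · by_cases h5 : (1966080:Int) < size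
        · rw [if_pos (show (0:Int) < size by omega), if_pos (show (131072:Int) < size by omega),
              if_pos (show (393216:Int) < size by omega), if_pos (show (786432:Int) < size by omega),
              if_pos (show (1310720:Int) < size by omega), if_pos (show (1966080:Int) < size by omega),
              if_neg (show ¬ (2752512:Int) < size by omega), if_neg (show ¬ (3670016:Int) < size by omega),
              if_neg (show ¬ (4718592:Int) < size by omega)]
          rw [stepA size 0 131072 131072 262144 (by norm_num) (by norm_num) (by omega) (by norm_num) (by norm_num),
              stepA size 131072 262144 393216 393216 (by norm_num) (by norm_num) (by omega) (by norm_num) (by norm_num),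
              stepA size 393216 393216 786432 524288 (by norm_num) (by norm_num) (by omega) (by norm_num) (by norm_num),
              stepA size 786432 524288 1310720 655360 (by norm_num) (by norm_num) (by omega) (by norm_num) (by norm_num),
              stepA size 1310720 655360 1966080 786432 (by norm_num) (by norm_num) (by omega) (by norm_num) (by norm_num)]
          rw [get_chunksA_loop, if_neg (show ¬ (1966080:Int) + 786432 < size by omega),
              if_pos (show (1966080:Int) < size by omega)]
          norm_num [pvPairs]
        · by_cases h4 : (1310720:Int) < size
          · rw [if_pos (show (0:Int) < size by omega), if_pos (show (131072:Int) < size by omega),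
                if_pos (show (393216:Int) < size by omega), if_pos (show (786432:Int) < size by omega),
                if_pos (show (1310720:Int) < size by omega), if_neg (show ¬ (1966080:Int) < size by omega),
                if_neg (show ¬ (2752512:Int) < size by omega), if_neg (show ¬ (3670016:Int) < size by omega),
                if_neg (show ¬ (4718592:Int) < size by omega)]
            rw [stepA size 0 131072 131072 262144 (by norm_num) (by norm_num) (by omega) (by norm_num) (by norm_num),
                stepA size 131072 262144 393216 393216 (by norm_num) (by norm_num) (by omega) (by norm_num) (by norm_num),
                stepA size 393216 393216 786432 524288 (by norm_num) (by norm_num) (by omega) (by norm_num) (by norm_num),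
                stepA size 786432 524288 1310720 655360 (by norm_num) (by norm_num) (by omega) (by norm_num) (by norm_num)]
            rw [get_chunksA_loop, if_neg (show ¬ (1310720:Int) + 655360 < size by omega),
                if_pos (show (1310720:Int) < size by omega)]
            norm_num [pvPairs]
          · by_cases h3 : (786432:Int) < size
            · rw [if_pos (show (0:Int) < size by omega), if_pos (show (131072:Int) < size by omega),
                  if_pos (show (393216:Int) < size by omega), if_pos (show (786432:Int) < size by omega),
                  if_neg (show ¬ (1310720:Int) < size by omega), if_neg (show ¬ (1966080:Int) < size by omega),
                  if_neg (show ¬ (2752512:Int) < size by omega), if_neg (show ¬ (3670016:Int) < size by omega),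
                  if_neg (show ¬ (4718592:Int) < size by omega)]
              rw [stepA size 0 131072 131072 262144 (by norm_num) (by norm_num) (by omega) (by norm_num) (by norm_num),
                  stepA size 131072 262144 393216 393216 (by norm_num) (by norm_num) (by omega) (by norm_num) (by norm_num),
                  stepA size 393216 393216 786432 524288 (by norm_num) (by norm_num) (by omega) (by norm_num) (by norm_num)]
              rw [get_chunksA_loop, if_neg (show ¬ (786432:Int) + 524288 < size by omega),
                  if_pos (show (786432:Int) < size by omega)]
              norm_num [pvPairs]
            · by_cases h2 : (393216:Int) < size
              · rw [if_pos (show (0:Int) < size by omega), if_pos (show (131072:Int) < size by omega),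
                    if_pos (show (393216:Int) < size by omega), if_neg (show ¬ (786432:Int) < size by omega),
                    if_neg (show ¬ (1310720:Int) < size by omega), if_neg (show ¬ (1966080:Int) < size by omega),
                    if_neg (show ¬ (2752512:Int) < size by omega), if_neg (show ¬ (3670016:Int) < size by omega),
                    if_neg (show ¬ (4718592:Int) < size by omega)]
                rw [stepA size 0 131072 131072 262144 (by norm_num) (by norm_num) (by omega) (by norm_num) (by norm_num),
                    stepA size 131072 262144 393216 393216 (by norm_num) (by norm_num) (by omega) (by norm_num) (by norm_num)]
                rw [get_chunksA_loop, if_neg (show ¬ (393216:Int) + 393216 < size by omega),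
                    if_pos (show (393216:Int) < size by omega)]
                norm_num [pvPairs]
              · by_cases h1 : (131072:Int) < size
                · rw [if_pos (show (0:Int) < size by omega), if_pos (show (131072:Int) < size by omega),
                      if_neg (show ¬ (393216:Int) < size by omega), if_neg (show ¬ (786432:Int) < size by omega),
                      if_neg (show ¬ (1310720:Int) < size by omega), if_neg (show ¬ (1966080:Int) < size by omega),
                      if_neg (show ¬ (2752512:Int) < size by omega), if_neg (show ¬ (3670016:Int) < size by omega),
                      if_neg (show ¬ (4718592:Int) < size by omega)]
                  rw [stepA size 0 131072 131072 262144 (by norm_num) (by norm_num) (by omega) (by norm_num) (by norm_num)]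
                  rw [get_chunksA_loop, if_neg (show ¬ (131072:Int) + 262144 < size by omega),
                      if_pos (show (131072:Int) < size by omega)]
                  norm_num [pvPairs]
                · by_cases h0 : (0:Int) < size
                  · rw [if_pos (show (0:Int) < size by omega), if_neg (show ¬ (131072:Int) < size by omega),
                        if_neg (show ¬ (393216:Int) < size by omega), if_neg (show ¬ (786432:Int) < size by omega),
                        if_neg (show ¬ (1310720:Int) < size by omega), if_neg (show ¬ (1966080:Int) < size by omega),
                        if_neg (show ¬ (2752512:Int) < size by omega), if_neg (show ¬ (3670016:Int) < size by omega),
                        if_neg (show ¬ (4718592:Int) < size by omega)]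
                    rw [get_chunksA_loop, if_neg (show ¬ (0:Int) + 131072 < size by omega),
                        if_pos (show (0:Int) < size by omega)]
                    norm_num [pvPairs]
                  · rw [if_neg (show ¬ (0:Int) < size by omega), if_neg (show ¬ (131072:Int) < size by omega),
                        if_neg (show ¬ (393216:Int) < size by omega), if_neg (show ¬ (786432:Int) < size by omega),
                        if_neg (show ¬ (1310720:Int) < size by omega), if_neg (show ¬ (1966080:Int) < size by omega),
                        if_neg (show ¬ (2752512:Int) < size by omega), if_neg (show ¬ (3670016:Int) < size by omega),
                        if_neg (show ¬ (4718592:Int) < size by omega)]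
                    rw [get_chunksA_loop, if_neg (show ¬ (0:Int) + 131072 < size by omega),
                        if_neg (show ¬ (0:Int) < size by omega)]
                    rfl
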